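-- pv_equiv track=rewrite | github.com/daniel-reich/ubiquitous-fiesta | BmZ6PGMJiLWMzgvos_10.py | is_special_array
-- ===== SOURCE A (Python) =====
-- def is_special_array(lst):
--     thingy = True
--     evens = lst[::2]
--     odds = lst[1::2]
--     for i in evens:
--         if i % 2 != 0:
--             thingy = False
--     for i in odds:
--         if i % 2 == 0:
--             thingy = False
--     if thingy == False:
--         return False
--     else:
--         return True
-- ===== SOURCE B (Python) =====
-- def is_special_array(lst):
--     return all(i % 2 == v % 2 for i, v in enumerate(lst))
-- ===== Notes on version B (the rewrite author's own statement) =====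
-- stated objective: idiomatic
-- what changed: Replaces the two step-2 slices and two flag-setting loops with a single pass over enumerate(lst) checking that each index's parity equals its element's parity, with short-circuiting all().
import Mathlib
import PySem

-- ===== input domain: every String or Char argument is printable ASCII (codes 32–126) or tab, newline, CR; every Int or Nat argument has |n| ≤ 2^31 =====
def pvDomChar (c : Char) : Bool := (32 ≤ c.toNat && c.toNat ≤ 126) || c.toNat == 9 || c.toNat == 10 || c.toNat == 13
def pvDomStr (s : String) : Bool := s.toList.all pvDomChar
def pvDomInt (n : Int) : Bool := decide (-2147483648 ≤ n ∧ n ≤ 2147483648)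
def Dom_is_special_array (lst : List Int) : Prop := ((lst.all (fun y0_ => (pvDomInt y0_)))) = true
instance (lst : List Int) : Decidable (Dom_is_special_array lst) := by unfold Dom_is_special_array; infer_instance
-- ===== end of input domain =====

-- B replaces A's two step-2 slices and two flag-setting loops with one pass over
-- enumerate(lst) checking index parity = element parity (idiomatic, same cost).


-- ===== PORT A =====
-- literal port of A: evens = lst[::2], odds = lst[1::2] (step-2 slices via PySem.List.slice?;
-- total here since the step is the literal 2 ≠ 0, so the getD [] default is never taken),
-- then the two flag-setting loops and the final if on the flag.
def is_special_array (lst : List Int) : Bool :=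
  let thingy := true
  let evens := (PySem.List.slice? lst none none 2).getD []
  let odds := (PySem.List.slice? lst (some 1) none 2).getD []
  let thingy := evens.foldl (fun th i => if PySem.Int.mod i 2 != 0 then false else th) thingy
  let thingy := odds.foldl (fun th i => if PySem.Int.mod i 2 == 0 then false else th) thingy
  if thingy == false then false else true

-- ===== PORT B =====
-- port of B: all(i % 2 == v % 2 for i, v in enumerate(lst))
def is_special_array_alt (lst : List Int) : Bool :=
  (PySem.List.enumerate lst 0).all (fun p => PySem.Int.mod p.1 2 == PySem.Int.mod p.2 2)

-- ===== PRECONDITION & SPEC =====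
def Spec_is_special_array (lst : List Int) (out : Bool) : Prop := out = is_special_array_alt lst
instance (lst : List Int) (out : Bool) : Decidable (Spec_is_special_array lst out) := by unfold Spec_is_special_array; infer_instance

-- ===== CLAIM (what is proved, stated in full; the proofs are below) =====
def Claim_equal_is_special_array : Prop := ∀ (lst : List Int), Dom_is_special_array lst → Spec_is_special_array lst (is_special_array lst)

-- ===== LEMMAS AND PROOFS =====

-- xs[b::2] as a structural function: sel true xs = xs[::2], sel false xs = xs[1::2]
def sel (b : Bool) : List Int → List Int
  | [] => []
  | a :: t => if b then a :: sel false t else sel true t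

-- the slice? formula specialised to start 0, step 2
theorem sliceE (xs : List Int) :
    PySem.List.slice? xs none none 2
      = some (List.filterMap (fun k => xs[(2*k : Nat)]?) (List.range ((xs.length+1)/2))) := by
  simp only [PySem.List.slice?, PySem.List.sliceIndices]
  norm_num
  have hc : (if 0 < xs.length then (((xs.length : Int) + 2 - 1) / 2).toNat else 0) = (xs.length + 1) / 2 := by
    split <;> omega
  rw [hc]
  apply List.filterMap_congr
  intro k _
  have : ((2 * (k : Int)).toNat) = 2 * k := by omega
  rw [this]

-- the slice? formula specialised to start 1, step 2
theorem sliceO (xs : List Int) :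
    PySem.List.slice? xs (some 1) none 2
      = some (List.filterMap (fun k => xs[(2*k+1 : Nat)]?) (List.range (xs.length/2))) := by
  simp only [PySem.List.slice?, PySem.List.sliceIndices]
  norm_num
  have hm : min 1 (xs.length : Int) = if xs.length = 0 then 0 else 1 := by split <;> omega
  rw [hm]
  have hc : (if 1 < xs.length then (((xs.length : Int) - (if xs.length = 0 then (0:Int) else 1) + 2 - 1) / 2).toNat else 0) = xs.length / 2 := by
    split <;> first | (split <;> omega) | omega
  rw [hc]
  apply List.filterMap_congr
  intro k hk
  simp only [List.mem_range] at hk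
  have : (((if xs.length = 0 then (0:Int) else 1) + 2 * (k : Int)).toNat) = 2 * k + 1 := by
    split <;> omega
  rw [this]

theorem filterMap_sel (xs : List Int) :
    List.filterMap (fun k => xs[(2*k : Nat)]?) (List.range ((xs.length+1)/2)) = sel true xs
    ∧ List.filterMap (fun k => xs[(2*k+1 : Nat)]?) (List.range (xs.length/2)) = sel false xs := by
  induction xs with
  | nil => simp [sel]
  | cons a t ih =>
    constructor
    · have hc : (((a :: t).length + 1) / 2) = t.length / 2 + 1 := by simp; omega
      rw [hc, List.range_succ_eq_map, List.filterMap_cons, List.filterMap_map]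
      simp only [show (2*0:Nat) = 0 from rfl, List.getElem?_cons_zero, sel, if_true]
      have hf : List.filterMap ((fun k => (a :: t)[(2 * k : Nat)]?) ∘ Nat.succ) (List.range (t.length / 2))
          = List.filterMap (fun k => t[(2 * k + 1 : Nat)]?) (List.range (t.length / 2)) := by
        apply List.filterMap_congr
        intro k _
        simp only [Function.comp_apply, Nat.succ_eq_add_one]
        rw [show (2 * (k + 1) : Nat) = (2 * k + 1) + 1 from by omega, List.getElem?_cons_succ]
      rw [hf, ← ih.2]
    · have hc : ((a :: t).length / 2) = (t.length + 1) / 2 := by simp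
      rw [hc]
      simp only [sel, Bool.false_eq_true, if_false]
      rw [← ih.1]
      apply List.filterMap_congr
      intro k _
      rw [show (2 * k + 1 : Nat) = (2 * k) + 1 from rfl, List.getElem?_cons_succ]

-- the flag loop is an 'all'
theorem foldl_flag (P : Int → Bool) (l : List Int) (b : Bool) :
    l.foldl (fun th i => if P i then false else th) b = (b && l.all (fun i => !P i)) := by
  induction l generalizing b with
  | nil => simp
  | cons a t ih =>
    simp only [List.foldl_cons, List.all_cons, ih]
    by_cases h : P a = true <;> simp [h]

theorem mod_two_cases (a : Int) : PySem.Int.mod a 2 = 0 ∨ PySem.Int.mod a 2 = 1 := by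
  simp only [PySem.Int.mod, Int.fmod_eq_emod]
  omega

theorem main_lemma (lst : List Int) (m : Nat) :
    ((sel true lst).all (fun i => !(PySem.Int.mod i 2 != 0))
       && (sel false lst).all (fun i => !(PySem.Int.mod i 2 == 0)))
      = (PySem.List.enumerate lst (2*(m:Int))).all
          (fun p => PySem.Int.mod p.1 2 == PySem.Int.mod p.2 2)
    ∧ ((sel true lst).all (fun i => !(PySem.Int.mod i 2 == 0))
       && (sel false lst).all (fun i => !(PySem.Int.mod i 2 != 0)))
      = (PySem.List.enumerate lst (2*(m:Int)+1)).all
          (fun p => PySem.Int.mod p.1 2 == PySem.Int.mod p.2 2) := by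
  induction lst generalizing m with
  | nil => simp [sel, PySem.List.enumerate]
  | cons a t ih =>
    have he : PySem.Int.mod (2*(m:Int)) 2 = 0 := by
      simp only [PySem.Int.mod, Int.fmod_eq_emod]; omega
    have ho : PySem.Int.mod (2*(m:Int)+1) 2 = 1 := by
      simp only [PySem.Int.mod, Int.fmod_eq_emod]; omega
    constructor
    · rw [PySem.List.enumerate_cons]
      simp only [sel, if_true, Bool.false_eq_true, if_false, List.all_cons]
      have hhead : (!(PySem.Int.mod a 2 != 0))
          = (PySem.Int.mod (2*(m:Int)) 2 == PySem.Int.mod a 2) := by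
        rw [he]; rcases mod_two_cases a with h | h <;> rw [h] <;> rfl
      rw [hhead, ← (ih m).2, Bool.and_assoc]
      congr 1
      exact Bool.and_comm _ _
    · rw [PySem.List.enumerate_cons]
      have h2 : (2*(m:Int)+1+1) = 2*((m+1 : Nat):Int) := by push_cast; ring
      simp only [sel, if_true, Bool.false_eq_true, if_false, List.all_cons, h2]
      have hhead : (!(PySem.Int.mod a 2 == 0))
          = (PySem.Int.mod (2*(m:Int)+1) 2 == PySem.Int.mod a 2) := by
        rw [ho]; rcases mod_two_cases a with h | h <;> rw [h] <;> rfl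
      rw [hhead, ← (ih (m+1)).1, Bool.and_assoc]
      congr 1
      exact Bool.and_comm _ _

theorem slice_sel (xs : List Int) :
    PySem.List.slice? xs none none 2 = some (sel true xs)
    ∧ PySem.List.slice? xs (some 1) none 2 = some (sel false xs) := by
  exact ⟨by rw [sliceE, (filterMap_sel xs).1], by rw [sliceO, (filterMap_sel xs).2]⟩

-- ===== VERDICT (by name: the statement is the Claim_ definition above) =====
theorem is_special_array_spec : Claim_equal_is_special_array := by
  intro lst _
  unfold Spec_is_special_array is_special_array is_special_array_alt
  obtain ⟨hE, hO⟩ := slice_sel lst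
  simp only [hE, hO, Option.getD_some, foldl_flag, Bool.true_and]
  have h := (main_lemma lst 0).1
  simp only [Nat.cast_zero, mul_zero] at h
  rw [← h]
  cases hA : (sel true lst).all (fun i => !(PySem.Int.mod i 2 != 0)) <;>
    cases hB : (sel false lst).all (fun i => !(PySem.Int.mod i 2 == 0)) <;> simp
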